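-- pv_equiv track=rewrite | github.com/IngMariaUribe/ArbolesBinarios | main.py | identificar
-- ===== SOURCE A (Python) =====
-- def identificar(ao,cn,co,t):
--    if(len(ao)>0):
--     if (ao[0]=="+" or ao[0]=="-" or ao[0]=="*" or ao[0]=="/"):
--       return identificar(ao[1:],cn,co+1,t)
--     return identificar(ao[1:],cn+1,co,t)
--    if(t<=3):
--      return True
--    return simetria(cn,co)
--
-- def simetria(cn,co):
--     if(((co-1)*2)==cn):
--       return True
--     return False
-- ===== SOURCE B (Python) =====
-- def identificar(ao, cn, co, t):
--     for c in ao: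
--         if c == "+" or c == "-" or c == "*" or c == "/":
--             co += 1
--         else:
--             cn += 1
--     if t <= 3:
--         return True
--     if ((co - 1) * 2) == cn:
--         return True
--     return False
-- ===== Notes on version B (the rewrite author's own statement) =====
-- stated objective: faster
-- what changed: Replaces the tail recursion on string slices (which copies the remaining string at every step) and the separate simetria helper with a single iterative for-loop over the characters accumulating the two counts, followed by the inlined terminal test.
import Mathlib
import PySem

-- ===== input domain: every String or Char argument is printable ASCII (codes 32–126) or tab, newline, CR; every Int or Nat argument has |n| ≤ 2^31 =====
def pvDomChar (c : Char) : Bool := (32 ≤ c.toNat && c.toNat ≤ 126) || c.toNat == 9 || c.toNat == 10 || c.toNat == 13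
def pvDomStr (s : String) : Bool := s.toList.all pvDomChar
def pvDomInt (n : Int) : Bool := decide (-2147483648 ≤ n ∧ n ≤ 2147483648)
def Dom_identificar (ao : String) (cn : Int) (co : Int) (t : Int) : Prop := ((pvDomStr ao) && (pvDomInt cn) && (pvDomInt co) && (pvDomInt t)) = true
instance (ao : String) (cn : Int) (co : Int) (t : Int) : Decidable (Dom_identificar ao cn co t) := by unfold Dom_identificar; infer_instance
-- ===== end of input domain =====

-- B replaces A's tail recursion on string slices (plus the simetria helper) with one
-- iterative loop over the characters accumulating both counts, then the inlined final test. (objective: simpler)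

-- ===== PORT A =====
-- helper simetria, as in A
def simetria (cn : Int) (co : Int) : Bool :=
  if ((co - 1) * 2) == cn then true else false

-- A's recursion, on the character list (ao[0] / ao[1:] become head / tail)
def identificarRec (l : List Char) (cn : Int) (co : Int) (t : Int) : Bool :=
  match l with
  | c :: rest =>
    if c == '+' || c == '-' || c == '*' || c == '/' then
      identificarRec rest cn (co + 1) t
    else
      identificarRec rest (cn + 1) co t
  | [] =>
    if t ≤ 3 then true else simetria cn co

def identificar (ao : String) (cn : Int) (co : Int) (t : Int) : Bool :=
  identificarRec ao.toList cn co t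

-- ===== PORT B =====
-- one for-loop over the characters, accumulating (cn, co); then the terminal test inlined
def identificar_alt (ao : String) (cn : Int) (co : Int) (t : Int) : Bool :=
  let p := ao.toList.foldl
    (fun (acc : Int × Int) (c : Char) =>
      if c == '+' || c == '-' || c == '*' || c == '/' then (acc.1, acc.2 + 1)
      else (acc.1 + 1, acc.2))
    (cn, co)
  if t ≤ 3 then true
  else if ((p.2 - 1) * 2) == p.1 then true else false

-- ===== PRECONDITION & SPEC =====
def Spec_identificar (ao : String) (cn : Int) (co : Int) (t : Int) (out : Bool) : Prop := out = identificar_alt ao cn co t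
instance (ao : String) (cn : Int) (co : Int) (t : Int) (out : Bool) : Decidable (Spec_identificar ao cn co t out) := by unfold Spec_identificar; infer_instance

-- ===== CLAIM (what is proved, stated in full; the proofs are below) =====
def Claim_equal_identificar : Prop := ∀ (ao : String) (cn : Int) (co : Int) (t : Int), Dom_identificar ao cn co t → Spec_identificar ao cn co t (identificar ao cn co t)

-- ===== LEMMAS AND PROOFS =====
theorem identificarRec_eq_fold (l : List Char) (cn co t : Int) :
    identificarRec l cn co t =
      (let p := l.foldl
        (fun (acc : Int × Int) (c : Char) =>
          if c == '+' || c == '-' || c == '*' || c == '/' then (acc.1, acc.2 + 1)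
          else (acc.1 + 1, acc.2))
        (cn, co)
       if t ≤ 3 then true
       else if ((p.2 - 1) * 2) == p.1 then true else false) := by
  induction l generalizing cn co with
  | nil => simp [identificarRec, simetria]
  | cons c rest ih =>
    simp only [identificarRec, List.foldl_cons]
    by_cases h : (c == '+' || c == '-' || c == '*' || c == '/') = true
    · simp [h, ih]
    · simp [h, ih]

-- ===== VERDICT (by name: the statement is the Claim_ definition above) =====
theorem identificar_spec : Claim_equal_identificar := by
  intro ao cn co t _
  unfold Spec_identificar identificar identificar_alt
  exact identificarRec_eq_fold ao.toList cn co t
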